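-- pv_equiv track=rewrite | github.com/thethanh02/python3 | PY01027.py | so_loc_phat_dep
-- ===== SOURCE A (Python) =====
-- def so_loc_phat_dep(n):
--     if n[0] == '8':
--         return "NO"
--     for i in n:
--         if i != '6' and i != '8':
--             return "NO"
--     for i in range(2, len(n)):
--         if n[i] == '8' and n[i-1] == '8' and n[i-2] == '8':
--             return "NO"
--     return "YES"
-- ===== SOURCE B (Python) =====
-- def so_loc_phat_dep(n):
--     if n[0] == '8':
--         return "NO"
--     run = 0
--     for c in n:
--         if c == '8':
--             run += 1
--             if run == 3:
--                 return "NO"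
--         elif c == '6':
--             run = 0
--         else:
--             return "NO"
--     return "YES"
-- ===== Notes on version B (the rewrite author's own statement) =====
-- stated objective: alternative
-- what changed: Replaces A's two passes (a full alphabet-check loop plus an index-window loop over range(2,len(n)) with three indexed lookups) by a single left-to-right pass that keeps a run-length counter of consecutive '8's, rejecting on an invalid character or when the run reaches 3; no indexing beyond n[0].
import Mathlib
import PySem

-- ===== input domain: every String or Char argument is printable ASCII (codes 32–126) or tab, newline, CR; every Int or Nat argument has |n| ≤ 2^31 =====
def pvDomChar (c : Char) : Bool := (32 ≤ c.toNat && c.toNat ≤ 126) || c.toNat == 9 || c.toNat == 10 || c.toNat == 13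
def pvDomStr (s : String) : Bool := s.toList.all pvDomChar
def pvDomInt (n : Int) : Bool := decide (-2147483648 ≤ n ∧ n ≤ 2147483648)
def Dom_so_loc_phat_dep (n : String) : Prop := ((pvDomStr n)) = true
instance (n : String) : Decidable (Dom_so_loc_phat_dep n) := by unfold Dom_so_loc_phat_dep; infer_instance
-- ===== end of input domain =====

-- B replaces A's two passes (alphabet loop + indexed window loop) by one pass with a
-- run-length counter of consecutive '8's; alternative decomposition, same cost.

-- ===== PORT A =====
-- first loop: 'for i in n: if i != '6' and i != '8': return "NO"' — true = fell through
def pvALoop1 : List Char → Bool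
  | [] => true
  | c :: cs => if c ≠ '6' && c ≠ '8' then false else pvALoop1 cs

-- second loop: 'for i in range(2, len(n)): if n[i]=='8' and n[i-1]=='8' and n[i-2]=='8': return "NO"'
-- true = some window of three '8's was found (Python returns "NO" there)
def pvALoop2 (l : List Char) (i : Nat) : Bool :=
  if h : i < l.length then
    (decide (l[i] = '8') && decide (l[i-1] = '8') && decide (l[i-2] = '8')) || pvALoop2 l (i+1)
  else false
termination_by l.length - i

def so_loc_phat_dep (n : String) : String :=
  match PySem.List.pyGet? n.toList 0 with
  | none => ""   -- Python raises IndexError on the empty string; excluded by Pre_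
  | some c =>
    if c = '8' then "NO"
    else if pvALoop1 n.toList = false then "NO"
    else if pvALoop2 n.toList 2 = true then "NO"
    else "YES"

-- ===== PORT B =====
-- single pass, run = current count of consecutive '8's
def pvBLoop : List Char → Nat → String
  | [], _ => "YES"
  | c :: cs, run =>
    if c = '8' then
      if run + 1 = 3 then "NO" else pvBLoop cs (run + 1)
    else if c = '6' then pvBLoop cs 0
    else "NO"

def so_loc_phat_dep_alt (n : String) : String :=
  match PySem.List.pyGet? n.toList 0 with
  | none => ""   -- n[0] raises IndexError on the empty string; excluded by Pre_
  | some c =>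
    if c = '8' then "NO"
    else pvBLoop n.toList 0

-- ===== PRECONDITION & SPEC =====
-- Pre_ excludes only the empty string, on which both Pythons raise IndexError at n[0].
def Pre_so_loc_phat_dep (n : String) : Prop := n ≠ ""
instance (n : String) : Decidable (Pre_so_loc_phat_dep n) := by unfold Pre_so_loc_phat_dep; infer_instance
def pvWitness_so_loc_phat_dep : String := "686"

def Spec_so_loc_phat_dep (n : String) (out : String) : Prop := out = so_loc_phat_dep_alt n
instance (n : String) (out : String) : Decidable (Spec_so_loc_phat_dep n out) := by unfold Spec_so_loc_phat_dep; infer_instance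

-- ===== CLAIM (what is proved, stated in full; the proofs are below) =====
def Claim_equal_so_loc_phat_dep : Prop := ∀ (n : String), Dom_so_loc_phat_dep n → Pre_so_loc_phat_dep n → Spec_so_loc_phat_dep n (so_loc_phat_dep n)

-- ===== LEMMAS AND PROOFS =====

-- specification predicates used only by the proofs
def pvHasTriple : List Char → Bool
  | '8' :: '8' :: '8' :: _ => true
  | _ :: cs => pvHasTriple cs
  | [] => false

-- first k chars exist and are all '8'
def pvLead8 : List Char → Nat → Bool
  | _, 0 => true
  | [], _ + 1 => false
  | c :: cs, k + 1 => decide (c = '8') && pvLead8 cs k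

theorem pvLead8_succ_imp (l : List Char) (k : Nat) (h : pvLead8 l (k+1) = true) :
    pvLead8 l k = true := by
  induction l generalizing k with
  | nil => simp [pvLead8] at h
  | cons c cs ih =>
    cases k with
    | zero => simp [pvLead8]
    | succ k =>
      simp only [pvLead8, Bool.and_eq_true] at h ⊢
      exact ⟨h.1, ih k h.2⟩

theorem pvLead8_long (l : List Char) (k : Nat) (h : l.length < k) : pvLead8 l k = false := by
  induction l generalizing k with
  | nil =>
    cases k with
    | zero => omega
    | succ k => rfl
  | cons c cs ih =>
    cases k with
    | zero => omega
    | succ k =>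
      show (decide (c = '8') && pvLead8 cs k) = false
      rw [ih k (by simpa using h)]
      simp

theorem pvLead8_three_imp (l : List Char) (h : pvLead8 l 3 = true) : pvHasTriple l = true := by
  match l, h with
  | [], h => rw [pvLead8_long _ 3 (by simp)] at h; exact absurd h (by simp)
  | [c], h => rw [pvLead8_long _ 3 (by simp)] at h; exact absurd h (by simp)
  | [c, c'], h => rw [pvLead8_long _ 3 (by simp)] at h; exact absurd h (by simp)
  | c0 :: c1 :: c2 :: rest, h =>
    simp only [pvLead8, Bool.and_eq_true, decide_eq_true_eq] at h
    obtain ⟨h0, h1, h2, -⟩ := h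
    subst h0; subst h1; subst h2
    rfl

theorem pvHasTriple_cons (c : Char) (cs : List Char) :
    pvHasTriple (c :: cs) = ((decide (c = '8') && pvLead8 cs 2) || pvHasTriple cs) := by
  match c, cs with
  | c, [] =>
    by_cases h : c = '8' <;> simp [pvHasTriple, pvLead8, h]
  | c, [c1] =>
    by_cases h : c = '8' <;> by_cases h1 : c1 = '8' <;>
      simp [pvHasTriple, pvLead8, h, h1]
  | c, c1 :: c2 :: rest =>
    by_cases h : c = '8' <;> by_cases h1 : c1 = '8' <;> by_cases h2 : c2 = '8' <;>
      simp [pvHasTriple, pvLead8, h, h1, h2]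

theorem pvHasTriple_short (l : List Char) (h : l.length ≤ 2) : pvHasTriple l = false := by
  match l, h with
  | [], _ => rfl
  | [c], _ =>
    rw [pvHasTriple_cons, pvLead8_long _ 2 (by simp)]
    simp [pvHasTriple]
  | [c, c'], _ =>
    rw [pvHasTriple_cons, pvHasTriple_cons, pvLead8_long [c'] 2 (by simp),
      pvLead8_long ([] : List Char) 2 (by simp)]
    simp [pvHasTriple]

-- pvALoop1 is the alphabet check
theorem pvALoop1_eq_all (l : List Char) :
    pvALoop1 l = l.all (fun c => decide (c = '6') || decide (c = '8')) := by
  induction l with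
  | nil => rfl
  | cons c cs ih =>
    by_cases h6 : c = '6' <;> by_cases h8 : c = '8' <;>
      simp [pvALoop1, h6, h8, ih]

-- pvALoop2 scans windows: from index i it sees exactly the triples of drop (i-2)
theorem pvALoop2_eq_hasTriple (l : List Char) (i : Nat) (hi : 2 ≤ i) :
    pvALoop2 l i = pvHasTriple (l.drop (i - 2)) := by
  by_cases h : i < l.length
  · rw [pvALoop2]
    simp only [h, dite_true]
    have h2 : i - 2 < l.length := by omega
    have h1' : i - 1 < l.length := by omega
    have e1 : i - 2 + 1 = i - 1 := by omega
    have e2 : i - 1 + 1 = i := by omega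
    have e3 : i + 1 - 2 = i - 1 := by omega
    have hdrop : l.drop (i - 2) = l[i-2] :: l[i-1] :: l[i] :: l.drop (i + 1) := by
      rw [List.drop_eq_getElem_cons h2, e1, List.drop_eq_getElem_cons h1', e2,
        List.drop_eq_getElem_cons h]
    have hdrop1 : l.drop (i - 1) = l[i-1] :: l[i] :: l.drop (i + 1) := by
      rw [List.drop_eq_getElem_cons h1', e2, List.drop_eq_getElem_cons h]
    have ih := pvALoop2_eq_hasTriple l (i + 1) (by omega)
    rw [e3, hdrop1] at ih
    rw [ih, hdrop]
    by_cases e0' : l[i] = '8' <;> by_cases e1' : l[i-1] = '8' <;> by_cases e2' : l[i-2] = '8' <;>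
      simp [pvHasTriple_cons, pvLead8, e0', e1', e2']
    -- remaining case (l[i] ≠ '8', l[i-1] = l[i-2] = '8'): the hypothesis is impossible
    intro hx
    rw [List.drop_eq_getElem_cons h] at hx
    have hz : pvLead8 (l[i] :: l.drop (i+1)) 1 = false := by
      show (decide (l[i] = '8') && pvLead8 (l.drop (i+1)) 0) = false
      simp [e0']
    rw [hz] at hx
    exact absurd hx (by simp)
  · rw [pvALoop2]
    simp only [h, dite_false]
    rw [pvHasTriple_short]
    simp only [List.length_drop]
    omega
termination_by l.length - i

-- extend-run predicate: what the '8'-run counter of B can still trigger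
def pvExt8 : List Char → Nat → Bool
  | [], _ => false
  | c :: cs, run =>
    if c = '8' then (decide (run + 1 = 3)) || pvExt8 cs (run + 1)
    else pvExt8 cs 0

theorem pvExt8_char (l : List Char) (r : Nat) (hr : r < 3) :
    pvExt8 l r = (pvLead8 l (3 - r) || pvHasTriple l) := by
  induction l generalizing r with
  | nil =>
    have : 3 - r = (3 - r - 1) + 1 := by omega
    rw [this]; rfl
  | cons c cs ih =>
    by_cases h8 : c = '8'
    · subst h8
      rw [pvHasTriple_cons]
      by_cases hr2 : r + 1 = 3
      · have : r = 2 := by omega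
        subst this
        simp [pvExt8, pvLead8]
      · have h3 : 3 - r = (3 - (r+1)) + 1 := by omega
        rw [pvExt8]
        simp only [if_true, decide_eq_true_eq, reduceIte, hr2, decide_eq_true_eq,
          decide_true, Bool.true_and]
        rw [ih (r+1) (by omega), h3]
        simp only [pvLead8, decide_true, Bool.true_and]
        -- r is 0 or 1 here
        interval_cases r
        · -- 3 - 1 = 2
          show (pvLead8 cs 2 || _) = _
          cases hA : pvLead8 cs 2 <;> cases hB : pvHasTriple cs <;>
            simp [hA, hB]
        · -- 3 - 2 = 1, goal has pvLead8 cs 1 on LHS, pvLead8 cs 1 inside RHS with pvLead8 cs 2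
          show (pvLead8 cs 1 || _) = (pvLead8 cs 1 || (pvLead8 cs 2 || _))
          cases hA : pvLead8 cs 1
          · have : pvLead8 cs 2 = false := by
              cases hB : pvLead8 cs 2
              · rfl
              · exact absurd (pvLead8_succ_imp cs 1 hB) (by simp [hA])
            simp [this]
          · simp
        · -- r = 2 contradicts hr2
          omega
    · rw [pvExt8]
      simp only [h8, if_false, reduceIte]
      rw [ih 0 (by omega)]
      have hlead : pvLead8 (c :: cs) (3 - r) = false := by
        have : 3 - r = (3 - r - 1) + 1 := by omega
        rw [this]
        simp [pvLead8, h8]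
      rw [hlead]
      have htr : pvHasTriple (c :: cs) = pvHasTriple cs := by
        rw [pvHasTriple_cons]
        simp [h8]
      rw [htr]
      cases hB : pvHasTriple cs
      · simp only [Bool.or_false, Bool.false_or]
        cases hA : pvLead8 cs 3
        · rfl
        · exact absurd (pvLead8_three_imp cs hA) (by simp [hB])
      · simp

-- B's loop in closed form
theorem pvBLoop_char (l : List Char) (r : Nat) (hr : r < 3) :
    pvBLoop l r =
      (if l.all (fun c => decide (c = '6') || decide (c = '8')) && !(pvExt8 l r) then "YES" else "NO") := by
  induction l generalizing r with
  | nil => rfl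
  | cons c cs ih =>
    by_cases h8 : c = '8'
    · subst h8
      by_cases hr2 : r + 1 = 3
      · simp [pvBLoop, pvExt8, hr2]
      · rw [pvBLoop]
        simp only [if_true, hr2, reduceIte, if_false, decide_true]
        rw [ih (r+1) (by omega)]
        simp [pvExt8, hr2]
    · by_cases h6 : c = '6'
      · subst h6
        rw [pvBLoop]
        simp only [reduceIte]
        rw [ih 0 (by omega)]
        simp [pvExt8]
      · simp [pvBLoop, h8, h6]

theorem so_loc_phat_dep_eq_alt (n : String) (hn : n ≠ "") :
    so_loc_phat_dep n = so_loc_phat_dep_alt n := by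
  have hl : n.toList ≠ [] := by
    intro h
    exact hn (by rwa [← String.toList_eq_nil_iff])
  obtain ⟨c, cs, hcons⟩ := List.exists_cons_of_ne_nil hl
  unfold so_loc_phat_dep so_loc_phat_dep_alt
  rw [hcons, PySem.List.pyGet?_zero_cons]
  by_cases h8 : c = '8'
  · simp [h8]
  · simp only [h8, if_false, reduceIte]
    rw [pvBLoop_char _ 0 (by omega), pvExt8_char _ 0 (by omega)]
    rw [pvALoop1_eq_all, pvALoop2_eq_hasTriple _ 2 (by omega)]
    simp only [Nat.sub_self, List.drop_zero]
    have habs : (pvLead8 (c :: cs) 3 || pvHasTriple (c :: cs)) = pvHasTriple (c :: cs) := by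
      cases hA : pvLead8 (c :: cs) 3
      · simp
      · simp [pvLead8_three_imp _ hA]
    rw [habs]
    cases hAll : (c :: cs).all (fun c => decide (c = '6') || decide (c = '8')) <;>
      cases hT : pvHasTriple (c :: cs) <;> simp [hAll, hT]

-- ===== VERDICT (by name: the statement is the Claim_ definition above) =====
theorem so_loc_phat_dep_spec : Claim_equal_so_loc_phat_dep := by
  intro n _ hpre
  exact so_loc_phat_dep_eq_alt n hpre
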